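-- pv_equiv track=rewrite | github.com/magekinnarus/Fooocus_Nex | backend/clip.py | _parse_parentheses
-- ===== SOURCE A (Python) =====
-- def _parse_parentheses(string):
--     result = []
--     current_item = ""
--     nesting_level = 0
--     for char in string:
--         if char == "(":
--             if nesting_level == 0:
--                 if current_item:
--                     result.append(current_item)
--                     current_item = "("
--                 else:
--                     current_item = "("
--             else:
--                 current_item += char
--             nesting_level += 1
--         elif char == ")":
--             nesting_level -= 1
--             if nesting_level == 0:
--                 result.append(current_item + ")")
--                 current_item = ""
--             else:
--                 current_item += char
--         else:
--             current_item += char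
--     if current_item:
--         result.append(current_item)
--     return result
-- ===== SOURCE B (Python) =====
-- def _parse_parentheses(string):
--     result = []
--     seg_start = 0
--     depth = 0
--     for i, char in enumerate(string):
--         if char == "(":
--             if depth == 0:
--                 if i > seg_start:
--                     result.append(string[seg_start:i])
--                 seg_start = i
--             depth += 1
--         elif char == ")":
--             depth -= 1
--             if depth == 0:
--                 result.append(string[seg_start:i + 1])
--                 seg_start = i + 1
--     if seg_start < len(string):
--         result.append(string[seg_start:])
--     return result
-- ===== Notes on version B (the rewrite author's own statement) =====
-- stated objective: simpler
-- what changed: B tracks only a depth counter and a segment-start index and emits whole slices of the input, instead of accumulating the current segment character by character.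
import Mathlib
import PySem

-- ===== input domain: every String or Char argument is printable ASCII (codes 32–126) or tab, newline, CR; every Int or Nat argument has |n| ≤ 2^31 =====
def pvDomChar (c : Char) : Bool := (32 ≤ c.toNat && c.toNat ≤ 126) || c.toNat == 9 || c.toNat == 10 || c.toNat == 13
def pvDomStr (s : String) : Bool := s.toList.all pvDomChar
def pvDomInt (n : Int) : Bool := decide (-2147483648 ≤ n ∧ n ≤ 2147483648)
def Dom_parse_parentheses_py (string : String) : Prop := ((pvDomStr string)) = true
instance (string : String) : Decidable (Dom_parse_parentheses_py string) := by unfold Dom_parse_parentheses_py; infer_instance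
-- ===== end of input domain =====

-- B keeps only a depth counter and a segment-start index and emits whole slices of the input,
-- instead of A's char-by-char accumulation of the current segment (objective: simpler).

-- ===== PORT A =====
-- Strings are handled on the List Char side (current_item : List Char, converted with String.ofList),
-- exact for Python string concatenation. Loop state: (result, current_item, nesting_level).
def ppA_loop : List Char → List String → List Char → Int → List String × List Char
  | [], res, cur, _ => (res, cur)
  | c :: rest, res, cur, d =>
    if c = '(' then
      if d = 0 then
        if cur ≠ [] then ppA_loop rest (res ++ [String.ofList cur]) ['('] (d + 1)
        else ppA_loop rest res ['('] (d + 1)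
      else ppA_loop rest res (cur ++ [c]) (d + 1)
    else if c = ')' then
      if d - 1 = 0 then ppA_loop rest (res ++ [String.ofList (cur ++ [')'])]) [] (d - 1)
      else ppA_loop rest res (cur ++ [c]) (d - 1)
    else ppA_loop rest res (cur ++ [c]) d

def parse_parentheses_py (string : String) : List String :=
  let r := ppA_loop string.toList [] [] 0
  if r.2 ≠ [] then r.1 ++ [String.ofList r.2] else r.1

-- ===== PORT B =====
-- string[a:b] for 0 ≤ a ≤ b (the only slices B takes): exact as (drop a).take (b - a).
def ppSlice (s : List Char) (a b : Nat) : List Char := (s.drop a).take (b - a)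

-- 'for i, char in enumerate(string)' ported as recursion threading the index i.
-- Loop state: (result, seg_start, depth).
def ppB_loop (s : List Char) : List Char → Nat → List String → Nat → Int → List String × Nat
  | [], _, res, seg, _ => (res, seg)
  | c :: rest, i, res, seg, d =>
    if c = '(' then
      if d = 0 then
        if seg < i then ppB_loop s rest (i + 1) (res ++ [String.ofList (ppSlice s seg i)]) i (d + 1)
        else ppB_loop s rest (i + 1) res i (d + 1)
      else ppB_loop s rest (i + 1) res seg (d + 1)
    else if c = ')' then
      if d - 1 = 0 then ppB_loop s rest (i + 1) (res ++ [String.ofList (ppSlice s seg (i + 1))]) (i + 1) (d - 1)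
      else ppB_loop s rest (i + 1) res seg (d - 1)
    else ppB_loop s rest (i + 1) res seg d

def parse_parentheses_py_alt (string : String) : List String :=
  let l := string.toList
  let r := ppB_loop l l 0 [] 0 0
  if r.2 < l.length then r.1 ++ [String.ofList (l.drop r.2)] else r.1

-- ===== PRECONDITION & SPEC =====
def Spec_parse_parentheses_py (string : String) (out : List String) : Prop := out = parse_parentheses_py_alt string
instance (string : String) (out : List String) : Decidable (Spec_parse_parentheses_py string out) := by unfold Spec_parse_parentheses_py; infer_instance

-- ===== CLAIM (what is proved, stated in full; the proofs are below) =====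
def Claim_equal_parse_parentheses_py : Prop := ∀ (string : String), Dom_parse_parentheses_py string → Spec_parse_parentheses_py string (parse_parentheses_py string)

-- ===== LEMMAS AND PROOFS =====

lemma ppSlice_eq_nil_iff (l : List Char) (seg i : Nat) :
    ppSlice l seg i = [] ↔ i - seg = 0 ∨ l.length ≤ seg := by
  simp [ppSlice, List.take_eq_nil_iff, List.drop_eq_nil_iff]

-- appending the next character c = l[i] extends the slice by one
lemma ppSlice_snoc (l : List Char) (seg i : Nat) (c : Char) (rest : List Char)
    (hsi : seg ≤ i) (hd : l.drop i = c :: rest) :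
    ppSlice l seg i ++ [c] = ppSlice l seg (i + 1) := by
  have hdd : (l.drop seg).drop (i - seg) = c :: rest := by
    rw [List.drop_drop, show seg + (i - seg) = i by omega]
    exact hd
  simp only [ppSlice, show i + 1 - seg = (i - seg) + 1 by omega]
  rw [List.take_add, hdd]
  simp

lemma ppSlice_empty (l : List Char) (i : Nat) : ppSlice l i i = [] := by
  simp [ppSlice]

lemma ppSlice_one (l : List Char) (i : Nat) (c : Char) (rest : List Char)
    (hd : l.drop i = c :: rest) : ppSlice l i (i + 1) = [c] := by
  simp [ppSlice, hd]

-- main invariant: A's current_item is exactly the slice l[seg:i]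
lemma pp_key (l : List Char) : ∀ (rest : List Char) (i : Nat) (res : List String) (seg : Nat) (d : Int),
    seg ≤ i → l.drop i = rest →
    (let r := ppA_loop rest res (ppSlice l seg i) d
     if r.2 ≠ [] then r.1 ++ [String.ofList r.2] else r.1) =
    (let r := ppB_loop l rest i res seg d
     if r.2 < l.length then r.1 ++ [String.ofList (l.drop r.2)] else r.1) := by
  intro rest
  induction rest with
  | nil =>
    intro i res seg d hsi hd
    have hil : l.length ≤ i := List.drop_eq_nil_iff.mp hd
    simp only [ppA_loop, ppB_loop]
    by_cases hseg : seg < l.length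
    · have hne : ppSlice l seg i ≠ [] := by
        rw [Ne, ppSlice_eq_nil_iff]; omega
      have heq : ppSlice l seg i = l.drop seg := by
        apply List.take_of_length_le; simp; omega
      have h2 : List.drop seg l ≠ [] := by
        rw [Ne, List.drop_eq_nil_iff]; omega
      simp only [if_pos hseg, heq, if_pos h2]
    · have he : ppSlice l seg i = [] := by
        rw [ppSlice_eq_nil_iff]; omega
      simp only [he, if_neg hseg]
      simp
  | cons c rest ih =>
    intro i res seg d hsi hd
    have hi : i < l.length := by
      by_contra h
      rw [show l.drop i = [] from List.drop_eq_nil_iff.mpr (by omega)] at hd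
      simp at hd
    have hd' : l.drop (i + 1) = rest := by
      have h2 := congrArg (List.drop 1) hd
      rw [List.drop_drop] at h2
      simpa [Nat.add_comm] using h2
    by_cases hc : c = '('
    · subst hc
      by_cases hdz : d = 0
      · subst hdz
        by_cases hlt : seg < i
        · have h1 : ppSlice l seg i ≠ [] := by
            rw [Ne, ppSlice_eq_nil_iff]; omega
          simp only [ppA_loop, ppB_loop, reduceIte, if_pos h1, if_pos hlt,
            ← ppSlice_one l i '(' rest hd, zero_add]
          exact ih (i + 1) (res ++ [String.ofList (ppSlice l seg i)]) i 1 (by omega) hd'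
        · have h1 : ¬ ppSlice l seg i ≠ [] := by
            rw [not_not, ppSlice_eq_nil_iff]; omega
          simp only [ppA_loop, ppB_loop, reduceIte, if_neg h1, if_neg hlt,
            ← ppSlice_one l i '(' rest hd, zero_add]
          exact ih (i + 1) res i 1 (by omega) hd'
      · simp only [ppA_loop, ppB_loop, reduceIte, if_neg hdz,
          ppSlice_snoc l seg i '(' rest hsi hd]
        exact ih (i + 1) res seg (d + 1) (by omega) hd'
    · by_cases hc2 : c = ')'
      · subst hc2
        by_cases hdz : d - 1 = 0
        · simp only [ppA_loop, ppB_loop, reduceIte, if_pos hdz,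
            ppSlice_snoc l seg i ')' rest hsi hd]
          have := ih (i + 1) (res ++ [String.ofList (ppSlice l seg (i + 1))]) (i + 1) (d - 1) (by omega) hd'
          simpa [ppSlice_empty] using this
        · simp only [ppA_loop, ppB_loop, reduceIte, if_neg hdz,
            ppSlice_snoc l seg i ')' rest hsi hd]
          exact ih (i + 1) res seg (d - 1) (by omega) hd'
      · simp only [ppA_loop, ppB_loop, if_neg hc, if_neg hc2,
          ppSlice_snoc l seg i c rest hsi hd]
        exact ih (i + 1) res seg d (by omega) hd'

-- ===== VERDICT (by name: the statement is the Claim_ definition above) =====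
theorem parse_parentheses_py_spec : Claim_equal_parse_parentheses_py := by
  intro s _
  unfold Spec_parse_parentheses_py parse_parentheses_py parse_parentheses_py_alt
  have := pp_key s.toList s.toList 0 [] 0 0 (Nat.le_refl 0) (by simp)
  rw [ppSlice_empty] at this
  exact this
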